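-- pv_equiv track=rewrite | github.com/Sokolan/AdventOfCode | python/2020/day04/sol4.py | fix_newlines
-- ===== SOURCE A (Python) =====
-- def fix_newlines(input):
--     fixed_lines = []
--     index = 0
--     fixed_lines.append("")
--     for line in input:
--         if not line:
--             index += 1
--             fixed_lines.append("")
--             continue
--         fixed_lines[index] += f" {line}"
--
--     return fixed_lines
-- ===== SOURCE B (Python) =====
-- def fix_newlines(input):
--     # Traverse the lines back-to-front, prepending: a blank line opens a new
--     # block at the front, a non-blank line is prefixed onto the first block.
--     blocks = ['']
--     for line in reversed(input):
--         if line: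
--             blocks[0] = f' {line}' + blocks[0]
--         else:
--             blocks.insert(0, '')
--     return blocks
-- ===== Notes on version B (the rewrite author's own statement) =====
-- stated objective: alternative
-- what changed: B builds the block list back-to-front in one reversed pass, prepending to the head block, instead of A's forward pass that keeps an integer index and appends to fixed_lines[index].
import Mathlib
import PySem

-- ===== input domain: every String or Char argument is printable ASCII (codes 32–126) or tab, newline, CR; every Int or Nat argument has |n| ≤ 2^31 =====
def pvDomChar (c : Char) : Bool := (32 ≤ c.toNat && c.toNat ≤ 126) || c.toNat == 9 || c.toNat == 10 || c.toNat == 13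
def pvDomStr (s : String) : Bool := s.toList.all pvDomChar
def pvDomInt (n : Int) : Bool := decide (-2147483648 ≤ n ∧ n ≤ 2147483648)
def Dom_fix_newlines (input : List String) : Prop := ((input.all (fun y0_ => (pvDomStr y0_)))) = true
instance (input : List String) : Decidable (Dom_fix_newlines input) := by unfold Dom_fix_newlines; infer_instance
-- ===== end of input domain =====

-- B replaces A's forward pass with an integer index into a growing list by a single
-- back-to-front pass that prepends blocks; same cost, different traversal (objective: alternative).

-- ===== PORT A =====
-- fixed_lines[index] += s : in-place append at Python index i.
-- Exact for 0 ≤ i < length, which covers every state A reaches (its index always equals length - 1).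
def pvAppendAt (xs : List String) (i : Int) (s : String) : List String :=
  match xs with
  | [] => []
  | x :: rest => if i = 0 then (x ++ s) :: rest else x :: pvAppendAt rest (i - 1) s

-- the body of A's for-loop over (fixed_lines, index)
def pvStepA (st : List String × Int) (line : String) : List String × Int :=
  if line = "" then (st.1 ++ [""], st.2 + 1)
  else (pvAppendAt st.1 st.2 (" " ++ line), st.2)

def fix_newlines (input : List String) : List String :=
  (input.foldl pvStepA (([""] : List String), (0 : Int))).1

-- ===== PORT B =====
-- reversed(input) loop that prepends: foldr over input; blocks is never empty.
def fix_newlines_alt (input : List String) : List String :=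
  input.foldr
    (fun line blocks =>
      if line ≠ "" then ((" " ++ line) ++ blocks.headD "") :: blocks.tail
      else "" :: blocks)
    [""]

-- ===== PRECONDITION & SPEC =====
def Spec_fix_newlines (input : List String) (out : List String) : Prop := out = fix_newlines_alt input
instance (input : List String) (out : List String) : Decidable (Spec_fix_newlines input out) := by unfold Spec_fix_newlines; infer_instance

-- ===== CLAIM (what is proved, stated in full; the proofs are below) =====
def Claim_equal_fix_newlines : Prop := ∀ (input : List String), Dom_fix_newlines input → Spec_fix_newlines input (fix_newlines input)

-- ===== LEMMAS AND PROOFS =====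

-- forward one-accumulator view of the grouping, used to bridge A's foldl and B's foldr
def pvConsume : List String → String → List String
  | [], cur => [cur]
  | l :: rest, cur => if l = "" then cur :: pvConsume rest "" else pvConsume rest (cur ++ (" " ++ l))

theorem pvConsume_alt (lines : List String) :
    ∀ cur, ∃ h t, fix_newlines_alt lines = h :: t ∧ pvConsume lines cur = (cur ++ h) :: t := by
  induction lines with
  | nil =>
    intro cur
    exact ⟨"", [], rfl, by simp [pvConsume]⟩
  | cons l rest ih =>
    intro cur
    by_cases hl : l = ""
    · obtain ⟨h, t, he, hc⟩ := ih ""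
      refine ⟨"", fix_newlines_alt rest, ?_, ?_⟩
      · simp [fix_newlines_alt, hl]
      · have : pvConsume rest "" = fix_newlines_alt rest := by
          rw [hc, he]; simp
        simp [pvConsume, hl, this]
    · obtain ⟨h, t, he, hc⟩ := ih (cur ++ (" " ++ l))
      refine ⟨(" " ++ l) ++ h, t, ?_, ?_⟩
      · simp [fix_newlines_alt, hl]
        simp [fix_newlines_alt] at he
        simp [he]
      · simp [pvConsume, hl, hc, String.append_assoc]

theorem pvAppendAt_last (front : List String) (cur s : String) :
    pvAppendAt (front ++ [cur]) ((front.length : Int)) s = front ++ [cur ++ s] := by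
  induction front with
  | nil => simp [pvAppendAt]
  | cons x xs ih =>
    simp [pvAppendAt, ih]
    intro h
    exact absurd h (by omega)

theorem pvLoopA (lines : List String) :
    ∀ (front : List String) (cur : String),
      (List.foldl pvStepA (front ++ [cur], (front.length : Int)) lines).1
        = front ++ pvConsume lines cur := by
  induction lines with
  | nil => intro front cur; simp [pvConsume]
  | cons l rest ih =>
    intro front cur
    by_cases hl : l = ""
    · have hstep : pvStepA (front ++ [cur], (front.length : Int)) l
          = ((front ++ [cur]) ++ [""], ((front ++ [cur]).length : Int)) := by
        simp [pvStepA, hl]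
      rw [List.foldl_cons, hstep, ih (front ++ [cur]) ""]
      simp [pvConsume, hl]
    · have hstep : pvStepA (front ++ [cur], (front.length : Int)) l
          = (front ++ [cur ++ (" " ++ l)], (front.length : Int)) := by
        simp [pvStepA, hl, pvAppendAt_last]
      rw [List.foldl_cons, hstep, ih front (cur ++ (" " ++ l))]
      simp [pvConsume, hl]

-- ===== VERDICT (by name: the statement is the Claim_ definition above) =====
theorem fix_newlines_spec : Claim_equal_fix_newlines := by
  intro input _
  show fix_newlines input = fix_newlines_alt input
  obtain ⟨h, t, he, hc⟩ := pvConsume_alt input ""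
  have hA : fix_newlines input = pvConsume input "" := by
    have := pvLoopA input [] ""
    simpa [fix_newlines] using this
  rw [hA, hc, he]
  simp
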